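-- pv_equiv track=rewrite | github.com/SangamNirala/scriptNew | backend/lib/advanced_context_engine.py | _find_engagement_indicators
-- ===== SOURCE A (Python) =====
-- from typing import Dict, List, Any, Optional, Tuple
--
-- def _find_engagement_indicators(titles: List[str]) -> List[str]:
--     """Find elements that drive engagement"""
--     engagement_words = ["amazing", "shocking", "incredible", "must", "should", "never", "always", "secret", "hack"]
--
--     indicators = []
--     for word in engagement_words:
--         count = sum(1 for title in titles if word.lower() in title.lower())
--         if count > 0:
--             indicators.append(f"{word}: appears in {count} titles")
--
--     return indicators
-- ===== SOURCE B (Python) =====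
-- def _count_vec(words, titles):
--     """Divide-and-conquer: count, per word, how many of these titles contain it."""
--     n = len(titles)
--     if n == 0:
--         return [0] * len(words)
--     if n == 1:
--         t = titles[0].lower()
--         return [1 if w in t else 0 for w in words]
--     mid = n // 2
--     left = _count_vec(words, titles[:mid])
--     right = _count_vec(words, titles[mid:])
--     return [a + b for a, b in zip(left, right)]
--
--
-- def _find_engagement_indicators(titles):
--     """Find elements that drive engagement"""
--     engagement_words = ["amazing", "shocking", "incredible", "must", "should", "never", "always", "secret", "hack"]
--     counts = _count_vec(engagement_words, titles)
--     return [f"{w}: appears in {c} titles" for w, c in zip(engagement_words, counts) if c > 0]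
-- ===== Notes on version B (the rewrite author's own statement) =====
-- stated objective: alternative
-- what changed: B replaces A's per-word linear scans of the title list with a recursive divide-and-conquer that splits the titles in half, computes a per-word containment count vector for each half, and merges the halves by pointwise vector addition, followed by one order-preserving emission pass.
import Mathlib
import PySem

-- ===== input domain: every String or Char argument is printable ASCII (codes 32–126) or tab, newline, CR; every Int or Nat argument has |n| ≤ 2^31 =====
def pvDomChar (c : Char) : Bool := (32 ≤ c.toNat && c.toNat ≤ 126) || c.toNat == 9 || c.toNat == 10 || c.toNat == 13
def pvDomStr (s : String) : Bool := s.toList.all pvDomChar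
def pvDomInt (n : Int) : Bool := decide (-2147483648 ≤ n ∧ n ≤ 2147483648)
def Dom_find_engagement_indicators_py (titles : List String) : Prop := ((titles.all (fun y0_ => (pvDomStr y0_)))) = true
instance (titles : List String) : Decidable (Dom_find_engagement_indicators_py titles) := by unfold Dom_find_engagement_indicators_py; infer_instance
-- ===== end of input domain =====

-- B computes the per-word counts by divide-and-conquer over the title list (split in
-- half, recurse, merge by pointwise addition), then emits the lines in keyword order;
-- A scans the whole title list (re-lowercasing every title) once per keyword.

-- ===== PORT A =====
def find_engagement_indicators_py (titles : List String) : List String :=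
  let engagement_words : List String :=
    ["amazing", "shocking", "incredible", "must", "should", "never", "always", "secret", "hack"]
  engagement_words.foldl (fun indicators word =>
    let count : Int := titles.foldl (fun acc title =>
      if PySem.Str.isIn (PySem.Str.lower word) (PySem.Str.lower title) then acc + 1 else acc) 0
    if 0 < count then
      indicators ++ [word ++ ": appears in " ++ PySem.Int.toStr count ++ " titles"]
    else indicators) []

-- ===== PORT B =====
def pvCountVec (words : List String) (titles : List String) : List Int :=
  let n := titles.length
  if n = 0 then words.map (fun _ => (0 : Int))
  else if n = 1 then
    -- titles[0] is safe here (n = 1); ported as headD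
    let t := PySem.Str.lower (titles.headD "")
    words.map (fun w => if PySem.Str.isIn w t then (1 : Int) else 0)
  else
    let mid := n / 2
    let left := pvCountVec words (titles.take mid)
    let right := pvCountVec words (titles.drop mid)
    (left.zip right).map (fun ab => ab.1 + ab.2)
termination_by titles.length
decreasing_by
  · simpa [List.length_take] using by omega
  · simpa using by omega

def pvEngagementWords : List String :=
  ["amazing", "shocking", "incredible", "must", "should", "never", "always", "secret", "hack"]

def find_engagement_indicators_py_alt (titles : List String) : List String :=
  let counts := pvCountVec pvEngagementWords titles
  (pvEngagementWords.zip counts).filterMap (fun wc =>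
    if 0 < wc.2 then some (wc.1 ++ ": appears in " ++ PySem.Int.toStr wc.2 ++ " titles") else none)

-- ===== PRECONDITION & SPEC =====
def Spec_find_engagement_indicators_py (titles : List String) (out : List String) : Prop := out = find_engagement_indicators_py_alt titles
instance (titles : List String) (out : List String) : Decidable (Spec_find_engagement_indicators_py titles out) := by unfold Spec_find_engagement_indicators_py; infer_instance

-- ===== CLAIM (what is proved, stated in full; the proofs are below) =====
def Claim_equal_find_engagement_indicators_py : Prop := ∀ (titles : List String), Dom_find_engagement_indicators_py titles → Spec_find_engagement_indicators_py titles (find_engagement_indicators_py titles)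

-- ===== LEMMAS AND PROOFS =====

-- A's outer loop is a filterMap over the word list
theorem pv_foldl_append_opt {a b : Type} (g : a -> Int) (h : a -> b) :
    forall (ws : List a) (acc : List b),
      ws.foldl (fun acc w => if 0 < g w then acc ++ [h w] else acc) acc
        = acc ++ ws.filterMap (fun w => if 0 < g w then some (h w) else none) := by
  intro ws
  induction ws with
  | nil => simp
  | cons w ws ih =>
    intro acc
    by_cases hw : 0 < g w <;> simp [List.foldl_cons, hw, ih]

-- filterMapping over (ws.zip (ws.map f)) is filterMapping over ws
theorem pv_zip_map_filterMap {a b c : Type} (f : a -> b) (g : a × b -> Option c) :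
    forall (ws : List a), (ws.zip (ws.map f)).filterMap g = ws.filterMap (fun w => g (w, f w)) := by
  intro ws
  induction ws with
  | nil => rfl
  | cons w ws ih => cases hg : g (w, f w) <;> simp [hg, ih]

-- pointwise addition of two maps over the same list
theorem pv_zip_map_add {a : Type} (f g : a -> Int) :
    forall (ws : List a),
      ((ws.map f).zip (ws.map g)).map (fun ab => ab.1 + ab.2) = ws.map (fun w => f w + g w) := by
  intro ws
  induction ws with
  | nil => rfl
  | cons w ws ih => simp [ih]

-- the divide-and-conquer count vector is the per-word containment count
theorem pv_countVec_eq (ws : List String) (ts : List String) :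
    pvCountVec ws ts
      = ws.map (fun w => ((ts.countP (fun t => PySem.Str.isIn w (PySem.Str.lower t)) : Nat) : Int)) := by
  generalize hn : ts.length = n
  induction n using Nat.strong_induction_on generalizing ts with
  | _ n ih =>
    rw [pvCountVec]
    by_cases h0 : ts.length = 0
    · have : ts = [] := List.length_eq_zero_iff.mp h0
      simp [this]
    · by_cases h1 : ts.length = 1
      · obtain ⟨t, ht⟩ := List.length_eq_one_iff.mp h1
        subst ht
        simp only [h1, if_true]
        apply List.map_congr_left
        intro w _
        simp only [List.headD, List.countP_cons, List.countP_nil]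
        split_ifs <;> simp
      · simp only [h0, h1, if_false]
        have hlt : ts.length / 2 < ts.length := by omega
        have hmid : (ts.take (ts.length / 2)).length = ts.length / 2 := by
          simp [List.length_take]; omega
        have hdrop : (ts.drop (ts.length / 2)).length = ts.length - ts.length / 2 := by simp
        rw [ih (ts.take (ts.length / 2)).length (by omega) _ rfl,
            ih (ts.drop (ts.length / 2)).length (by omega) _ rfl,
            pv_zip_map_add]
        apply List.map_congr_left
        intro w _
        have := List.take_append_drop (ts.length / 2) ts
        conv_rhs => rw [← this]
        rw [List.countP_append]
        push_cast
        ring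

-- the nine engagement words are already lowercase
theorem pv_words_lower : ∀ w ∈ pvEngagementWords, PySem.Str.lower w = w := by
  decide

-- ===== VERDICT (by name: the statement is the Claim_ definition above) =====
theorem find_engagement_indicators_py_spec : Claim_equal_find_engagement_indicators_py := by
  intro titles _
  unfold Spec_find_engagement_indicators_py find_engagement_indicators_py
    find_engagement_indicators_py_alt
  rw [pv_foldl_append_opt
        (g := fun w => titles.foldl (fun acc title =>
          if PySem.Str.isIn (PySem.Str.lower w) (PySem.Str.lower title) then acc + 1 else acc) 0)
        (h := fun w => w ++ ": appears in " ++
          PySem.Int.toStr (titles.foldl (fun acc title =>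
            if PySem.Str.isIn (PySem.Str.lower w) (PySem.Str.lower title) then acc + 1 else acc) 0)
          ++ " titles")]
  rw [pv_countVec_eq, pv_zip_map_filterMap]
  simp only [List.nil_append]
  apply List.filterMap_congr
  intro w hw
  rw [pv_words_lower w hw]
  simp [PySem.List.foldl_if_add_one]
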